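-- pv_equiv track=rewrite | github.com/tulsluper/sanscript | apps/fc/scripts/collect_ports.py | switchshow_to_ports
-- ===== SOURCE A (Python) =====
-- def switchshow_to_ports(lines):
--     ports = []
--     notslot = False
--     portline = False
--     for line in lines:
--         if portline:
--             values = line.split()
--             if notslot:
--                 values.insert(1,'')
--             uPort = '/'.join(values[1:3]) if values[1] else values[2]
--             ports.append(uPort)
--         elif line[:5] == 'Index' and not 'Slot' in line:
--             notslot = True
--         elif line[:4] == 'Area':
--             notslot = True
--         elif line[0] == '=':
--             portline = True
--     return ports
-- ===== SOURCE B (Python) =====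
-- def switchshow_to_ports(lines):
--     # Separator = first line whose first char is '='; line[0] raises on an
--     # empty header line exactly as A does.
--     sep = next((i for i, line in enumerate(lines) if line[0] == '='), None)
--     if sep is None:
--         return []
--     notslot = any(
--         (line.startswith('Index') and 'Slot' not in line) or line.startswith('Area')
--         for line in lines[:sep]
--     )
--     body = lines[sep + 1:]
--     if notslot:
--         # With a '' slot inserted, A's values[1] is falsy, so it returns
--         # values[2] == second token of the line.
--         return [line.split()[1] for line in body]
--     return ['/'.join(line.split()[1:3]) for line in body]
-- ===== Notes on version B (the rewrite author's own statement) =====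
-- stated objective: simpler
-- what changed: B has no mutable flags or stateful loop: it locates the separator index declaratively with next/enumerate, computes notslot with any() over the header slice, and then emits the whole result as one of two branch-specific list comprehensions (second token vs '/'-join of tokens 1-2), exploiting that split() tokens are never empty so A's values[1] truthiness test is redundant.
import Mathlib
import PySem

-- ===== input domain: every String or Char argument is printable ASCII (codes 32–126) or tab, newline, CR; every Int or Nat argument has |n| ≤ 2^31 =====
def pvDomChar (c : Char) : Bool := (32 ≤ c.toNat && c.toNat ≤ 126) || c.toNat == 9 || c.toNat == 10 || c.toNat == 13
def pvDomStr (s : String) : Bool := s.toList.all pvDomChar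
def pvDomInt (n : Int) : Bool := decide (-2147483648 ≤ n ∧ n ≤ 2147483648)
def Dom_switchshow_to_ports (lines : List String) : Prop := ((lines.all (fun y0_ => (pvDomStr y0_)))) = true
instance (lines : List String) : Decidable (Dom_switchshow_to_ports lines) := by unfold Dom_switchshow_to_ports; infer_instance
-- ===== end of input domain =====

-- B replaces A's flag-driven accumulator loop by declarative passes (separator index, any() over the header, one branch-specific comprehension for the body); equal return value, no speed claim.


-- ===== PORT A =====
-- one fold over the lines with state (ports, notslot, portline), exactly A's loop
def pvStepA (st : List String × Bool × Bool) (line : String) : List String × Bool × Bool :=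
  if st.2.2 then
    let values := PySem.Str.split₀ line
    let values := if st.2.1 then PySem.List.insert values 1 "" else values
    -- values[1] / values[2] raise in Python when out of range; Pre_ excludes those lines
    let uPort := if PySem.List.pyGetD values 1 "" ≠ "" then
        PySem.Str.join "/" (PySem.List.slice values (some 1) (some 3))
      else PySem.List.pyGetD values 2 ""
    (st.1 ++ [uPort], st.2.1, st.2.2)
  else if PySem.Str.slice line none (some 5) == "Index" && !(PySem.Str.isIn "Slot" line) then
    (st.1, true, st.2.2)
  else if PySem.Str.slice line none (some 4) == "Area" then
    (st.1, true, st.2.2)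
  else if PySem.Str.pyGet? line 0 == some '=' then  -- line[0]: raises on ""; Pre_ excludes
    (st.1, st.2.1, true)
  else st

def switchshow_to_ports (lines : List String) : List String :=
  (lines.foldl pvStepA ([], false, false)).1

-- ===== PORT B =====
-- Source B's separator predicate (line[0] == '='; Python raises on "", Pre_ excludes that)
def pvIsSep (l : String) : Bool := PySem.Str.pyGet? l 0 == some '='
-- Source B's any()-predicate for the notslot header check
def pvIsNoslot (l : String) : Bool :=
  (PySem.Str.startswith l "Index" && !(PySem.Str.isIn "Slot" l)) || PySem.Str.startswith l "Area"
-- Source B's notslot comprehension body: line.split()[1]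
def pvSlotPort (l : String) : String := PySem.List.pyGetD (PySem.Str.split₀ l) 1 ""
-- Source B's other comprehension body: '/'.join(line.split()[1:3])
def pvJoinPort (l : String) : String :=
  PySem.Str.join "/" (PySem.List.slice (PySem.Str.split₀ l) (some 1) (some 3))

def switchshow_to_ports_alt (lines : List String) : List String :=
  match lines.findIdx? pvIsSep with
  | none => []
  | some sep =>
      if (lines.take sep).any pvIsNoslot then (lines.drop (sep + 1)).map pvSlotPort
      else (lines.drop (sep + 1)).map pvJoinPort

-- ===== PRECONDITION & SPEC =====
-- Pre_ excludes exactly the inputs on which Python A raises IndexError: an empty line before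
-- (or with no) '=' separator (line[0]), or a line after the separator with fewer than two
-- whitespace-separated tokens (values[1] / values[2]).
def Pre_switchshow_to_ports (lines : List String) : Prop :=
  let i := ((lines.findIdx? (fun l => PySem.Str.pyGet? l 0 == some '=')).getD lines.length)
  (∀ l ∈ lines.take i, l ≠ "") ∧
    ∀ l ∈ lines.drop (i + 1), 2 ≤ (PySem.Str.split₀ l).length
instance (lines : List String) : Decidable (Pre_switchshow_to_ports lines) := by
  unfold Pre_switchshow_to_ports; infer_instance

def pvWitness_switchshow_to_ports : List String :=
  ["Index Port Address", "==========", "0 1 010000 id N8 Online"]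

def Spec_switchshow_to_ports (lines : List String) (out : List String) : Prop := out = switchshow_to_ports_alt lines
instance (lines : List String) (out : List String) : Decidable (Spec_switchshow_to_ports lines out) := by unfold Spec_switchshow_to_ports; infer_instance

-- ===== CLAIM (what is proved, stated in full; the proofs are below) =====
def Claim_equal_switchshow_to_ports : Prop := ∀ (lines : List String), Dom_switchshow_to_ports lines → Pre_switchshow_to_ports lines → Spec_switchshow_to_ports lines (switchshow_to_ports lines)

-- ===== LEMMAS AND PROOFS =====

-- B's two phases with an explicit initial notslot flag (proof-side generalisation of B's port)
def pvAltAux (lines : List String) (ns : Bool) : List String :=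
  match lines.findIdx? pvIsSep with
  | none => []
  | some sep =>
      if ns || (lines.take sep).any pvIsNoslot then (lines.drop (sep + 1)).map pvSlotPort
      else (lines.drop (sep + 1)).map pvJoinPort

theorem pvAlt_eq (lines : List String) : switchshow_to_ports_alt lines = pvAltAux lines false := by
  unfold switchshow_to_ports_alt pvAltAux
  cases lines.findIdx? pvIsSep <;> simp

-- str.split() never yields an empty token (invariant of split₀.go's accumulator)
theorem pvGoTokens_ne_nil (s : List Char) : ∀ (cur : List Char) (acc : List (List Char)),
    (∀ t ∈ acc, t ≠ []) →
    ∀ t ∈ PySem.Chars.split₀.go s cur acc, t ≠ [] := by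
  induction s with
  | nil =>
      intro cur acc hacc t ht
      simp only [PySem.Chars.split₀.go] at ht
      split at ht
      · exact hacc t (by simpa using ht)
      · rename_i hcur
        simp only [List.reverse_cons, List.mem_append, List.mem_reverse,
          List.mem_singleton] at ht
        rcases ht with h | rfl
        · exact hacc t h
        · intro h
          exact hcur (List.isEmpty_iff.mpr (List.reverse_eq_nil_iff.mp h))
  | cons c rest ih =>
      intro cur acc hacc t ht
      simp only [PySem.Chars.split₀.go] at ht
      split at ht
      · split at ht
        · exact ih [] acc hacc t ht
        · rename_i hcur
          refine ih [] (cur.reverse :: acc) ?_ t ht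
          intro u hu
          rcases List.mem_cons.mp hu with rfl | hu
          · intro h
            exact hcur (List.isEmpty_iff.mpr (List.reverse_eq_nil_iff.mp h))
          · exact hacc u hu
      · exact ih (c :: cur) acc hacc t ht

theorem pvSplit₀_ne_nil (l : String) : ∀ t ∈ PySem.Str.split₀ l, t ≠ "" := by
  intro t ht h
  have h2 : t.toList ∈ List.map String.toList (PySem.Str.split₀ l) := List.mem_map_of_mem ht
  rw [PySem.Str.split₀_map_toList] at h2
  have := pvGoTokens_ne_nil l.toList [] [] (by simp) t.toList (by
    simpa [PySem.Chars.split₀] using h2)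
  exact this (by simp [h])

-- A's body-line expression equals B's comprehension body, for either flag value
theorem pvStepA_portline (ports : List String) (ns : Bool) (l : String) :
    pvStepA (ports, ns, true) l
      = (ports ++ [if ns then pvSlotPort l else pvJoinPort l], ns, true) := by
  simp only [pvStepA]
  cases ns with
  | false =>
      simp only [Bool.false_eq_true, if_false, if_true, pvJoinPort]
      rcases hv : PySem.Str.split₀ l with _ | ⟨v0, _ | ⟨v1, vs⟩⟩
      · simp; decide
      · simp; intro _; rfl
      · have h1 : PySem.List.pyGetD (v0 :: v1 :: vs) (1 : Int) "" = v1 := by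
          simpa using PySem.List.pyGetD_ofNat' (v0 :: v1 :: vs) 1 ""
        have hne : v1 ≠ "" := pvSplit₀_ne_nil l v1 (by rw [hv]; simp)
        simp [h1, hne]
  | true =>
      simp only [if_true, pvSlotPort]
      rcases hv : PySem.Str.split₀ l with _ | ⟨v0, _ | ⟨v1, vs⟩⟩
      · simp; decide
      · simp
        have e : PySem.List.insert [v0] (1:Int) "" = [v0, ""] := rfl
        rw [e]
        have e1 : PySem.List.pyGetD [v0, ""] (1:Int) "" = "" := rfl
        have e2 : PySem.List.pyGetD [v0, ""] (2:Int) "" = "" := rfl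
        have e3 : PySem.List.pyGetD [v0] (1:Int) "" = "" := rfl
        simp [e1, e2, e3]
      · have hins : PySem.List.insert (v0 :: v1 :: vs) (1:Int) "" = v0 :: "" :: v1 :: vs := by
          simpa using PySem.List.insert_ofNat (v0 :: v1 :: vs) 1 "" (by simp)
        have h1 : PySem.List.pyGetD (v0 :: "" :: v1 :: vs) (1 : Int) "" = "" := by
          simpa using PySem.List.pyGetD_ofNat' (v0 :: "" :: v1 :: vs) 1 ""
        have h2 : PySem.List.pyGetD (v0 :: "" :: v1 :: vs) (2 : Int) "" = v1 := by
          simpa using PySem.List.pyGetD_ofNat' (v0 :: "" :: v1 :: vs) 2 ""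
        have h3 : PySem.List.pyGetD (v0 :: v1 :: vs) (1 : Int) "" = v1 := by
          simpa using PySem.List.pyGetD_ofNat' (v0 :: v1 :: vs) 1 ""
        simp [hins, h1, h2, h3]

-- once the separator is seen, A's loop appends one formatted value per remaining line
theorem pvFoldA_portline (rest : List String) (ports : List String) (ns : Bool) :
    (rest.foldl pvStepA (ports, ns, true)).1
      = ports ++ (if ns then rest.map pvSlotPort else rest.map pvJoinPort) := by
  induction rest generalizing ports with
  | nil => cases ns <;> simp
  | cons l t ih =>
      simp only [List.foldl_cons]
      rw [pvStepA_portline, ih]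
      cases ns <;> simp

-- matching A's prefix tests with B's predicates
theorem pvIndex_eq (l : String) :
    (PySem.Str.slice l none (some 5) == "Index") = PySem.Str.startswith l "Index" := by
  rw [Bool.eq_iff_iff, beq_iff_eq, PySem.Str.startswith,
      PySem.Chars.startswith_iff, ← String.toList_inj, PySem.Str.toList_slice]
  have hs : PySem.Chars.slice l.toList none (some 5) = l.toList.take 5 := by
    have := PySem.List.slice_to (xs := l.toList) (b := 5) (by norm_num)
    simpa using this
  rw [hs, List.prefix_iff_eq_take]
  constructor
  · intro h; exact h.symm
  · intro h; exact h.symm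

theorem pvArea_eq (l : String) :
    (PySem.Str.slice l none (some 4) == "Area") = PySem.Str.startswith l "Area" := by
  rw [Bool.eq_iff_iff, beq_iff_eq, PySem.Str.startswith,
      PySem.Chars.startswith_iff, ← String.toList_inj, PySem.Str.toList_slice]
  have hs : PySem.Chars.slice l.toList none (some 4) = l.toList.take 4 := by
    have := PySem.List.slice_to (xs := l.toList) (b := 4) (by norm_num)
    simpa using this
  rw [hs, List.prefix_iff_eq_take]
  constructor
  · intro h; exact h.symm
  · intro h; exact h.symm

-- a line matching one of A's header prefixes cannot be the '=' separator
theorem pvStarts_not_sep (l : String) (c : Char) (p : String)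
    (hne : c ≠ '=') (hh : p.toList.head? = some c)
    (h : PySem.Str.startswith l p = true) : pvIsSep l = false := by
  unfold pvIsSep
  rw [PySem.Str.startswith, PySem.Chars.startswith_iff] at h
  rcases h with ⟨t, ht⟩
  rcases hp : p.toList with _ | ⟨c', rest⟩
  · rw [hp] at hh; simp at hh
  · rw [hp] at hh; simp at hh
    have hne' : c' ≠ '=' := by rw [hh]; exact hne
    rw [hp] at ht
    rw [PySem.Str.pyGet?_eq, ← ht]
    show (PySem.List.pyGet? (c' :: (rest ++ t)) 0 == some '=') = false
    rw [PySem.List.pyGet?_zero_cons]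
    simpa using hne'

-- the main loop invariant: A's fold from the header state computes B's two phases
theorem pvFoldA_header (lines : List String) (ns : Bool) :
    (lines.foldl pvStepA ([], ns, false)).1 = pvAltAux lines ns := by
  induction lines generalizing ns with
  | nil => simp [pvAltAux]
  | cons l t ih =>
      simp only [List.foldl_cons]
      by_cases h1 : (PySem.Str.slice l none (some 5) == "Index"
          && !(PySem.Str.isIn "Slot" l)) = true
      · have e : pvStepA ([], ns, false) l = ([], true, false) := by
          simp only [pvStepA]; rw [h1]; rfl
        have hsw : PySem.Str.startswith l "Index" = true := by
          have h1' := h1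
          rw [pvIndex_eq] at h1'
          simp only [Bool.and_eq_true] at h1'
          exact h1'.1
        have hsep : pvIsSep l = false := pvStarts_not_sep l 'I' "Index" (by decide) (by decide) hsw
        have hns : pvIsNoslot l = true := by
          unfold pvIsNoslot; rw [← pvIndex_eq, h1]; rfl
        rw [e, ih true]
        unfold pvAltAux
        rw [List.findIdx?_cons, hsep]
        simp only [Bool.false_eq_true, if_false]
        cases hf : List.findIdx? pvIsSep t with
        | none => simp
        | some j =>
            simp [List.take_succ_cons, List.drop_succ_cons, hns]
      · by_cases h2 : (PySem.Str.slice l none (some 4) == "Area") = true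
        · have e : pvStepA ([], ns, false) l = ([], true, false) := by
            simp only [pvStepA]; rw [Bool.eq_false_iff.mpr h1, h2]; rfl
          have hsw : PySem.Str.startswith l "Area" = true := by rwa [pvArea_eq] at h2
          have hsep : pvIsSep l = false := pvStarts_not_sep l 'A' "Area" (by decide) (by decide) hsw
          have hns : pvIsNoslot l = true := by
            unfold pvIsNoslot; rw [← pvArea_eq, h2]; simp
          rw [e, ih true]
          unfold pvAltAux
          rw [List.findIdx?_cons, hsep]
          simp only [Bool.false_eq_true, if_false]
          cases hf : List.findIdx? pvIsSep t with
          | none => simp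
          | some j =>
              simp [List.take_succ_cons, List.drop_succ_cons, hns]
        · by_cases h3 : (PySem.Str.pyGet? l 0 == some '=') = true
          · have e : pvStepA ([], ns, false) l = ([], ns, true) := by
              simp only [pvStepA]; rw [Bool.eq_false_iff.mpr h1, Bool.eq_false_iff.mpr h2, h3]; rfl
            have hsep : pvIsSep l = true := h3
            rw [e, pvFoldA_portline t [] ns]
            unfold pvAltAux
            rw [List.findIdx?_cons, hsep]
            cases ns <;> simp
          · have e : pvStepA ([], ns, false) l = ([], ns, false) := by
              simp only [pvStepA]
              rw [Bool.eq_false_iff.mpr h1, Bool.eq_false_iff.mpr h2, Bool.eq_false_iff.mpr h3]; rfl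
            have hsep : pvIsSep l = false := Bool.eq_false_iff.mpr h3
            have hns : pvIsNoslot l = false := by
              unfold pvIsNoslot
              rw [← pvIndex_eq, ← pvArea_eq, Bool.eq_false_iff.mpr h1, Bool.eq_false_iff.mpr h2]; rfl
            rw [e, ih ns]
            unfold pvAltAux
            rw [List.findIdx?_cons, hsep]
            simp only [Bool.false_eq_true, if_false]
            cases hf : List.findIdx? pvIsSep t with
            | none => simp
            | some j =>
                simp [List.take_succ_cons, List.drop_succ_cons, hns]

-- ===== VERDICT (by name: the statement is the Claim_ definition above) =====
theorem switchshow_to_ports_spec : Claim_equal_switchshow_to_ports := by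
  intro lines _ _
  unfold Spec_switchshow_to_ports switchshow_to_ports
  rw [pvAlt_eq, ← pvFoldA_header lines false]
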